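-- pv_equiv track=rewrite | github.com/salzmanlab-admin/SQUICH_Data_Processing | generate_counts.py | degen_hamming
-- ===== SOURCE A (Python) =====
-- def degen_hamming(s, degen):
--     """Find distance between sequences where the second can be degenerate"""
--     if len(s) != len(degen):
--         raise ValueError("Undefined for sequences of unequal length")
--     dist = 0
--     for i in range(len(s)):
--         same = False
--         if s[i] == degen[i]:
--             same = True
--         elif s[i] == "A" and degen[i] in {"R","M","W","H","D","V","N"}:
--             same = True
--         elif s[i] == "T" and degen[i] in {"Y","K","W","H","B","D","N"}:
--             same = True
--         elif s[i] == "G" and degen[i] in {"R","K","S","B","D","V","N"}: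
--             same = True
--         elif s[i] == "C" and degen[i] in {"Y","M","S","H","B","V","N"}:
--             same = True
--         if not same:
--             dist += 1
--     return dist
-- ===== SOURCE B (Python) =====
-- # B: encode bases/codes as 4-bit masks (A=1,C=2,G=4,T=8); aggregate equal (s,degen)
-- # character pairs with a Counter so the compatibility test (bitwise AND) runs once
-- # per distinct pair, then sum the counts of incompatible pairs.
-- from collections import Counter
--
-- _BASE = {"A": 1, "C": 2, "G": 4, "T": 8}
-- _CODE = {"R": 5, "Y": 10, "S": 6, "W": 9, "K": 12, "M": 3,
--          "B": 14, "D": 13, "H": 11, "V": 7, "N": 15}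
--
-- def degen_hamming(s, degen):
--     """Find distance between sequences where the second can be degenerate"""
--     if len(s) != len(degen):
--         raise ValueError("Undefined for sequences of unequal length")
--     dist = 0
--     for (a, b), cnt in Counter(zip(s, degen)).items():
--         if a != b and _BASE.get(a, 0) & _CODE.get(b, 0) == 0:
--             dist += cnt
--     return dist
-- ===== Notes on version B (the rewrite author's own statement) =====
-- stated objective: faster
-- what changed: Replaces the five-way branch cascade per position by 4-bit base/IUPAC-code masks tested with a bitwise AND, and replaces the per-position loop by a Counter aggregating equal character pairs, so the compatibility test runs once per distinct pair (at most ~alphabet^2 of them) and counts are summed.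
import Mathlib
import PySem

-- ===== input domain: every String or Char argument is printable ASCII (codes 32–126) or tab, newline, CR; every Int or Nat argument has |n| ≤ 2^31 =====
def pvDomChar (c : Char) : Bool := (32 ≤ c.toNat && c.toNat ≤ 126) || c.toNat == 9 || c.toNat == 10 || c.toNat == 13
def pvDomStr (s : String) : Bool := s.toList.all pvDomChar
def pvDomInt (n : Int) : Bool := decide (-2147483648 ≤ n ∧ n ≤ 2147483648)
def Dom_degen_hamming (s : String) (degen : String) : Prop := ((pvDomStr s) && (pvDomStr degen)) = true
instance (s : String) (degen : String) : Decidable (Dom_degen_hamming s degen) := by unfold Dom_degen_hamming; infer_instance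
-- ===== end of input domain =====

-- B replaces A's per-position flag-and-branch-cascade loop by bitmask encodings of
-- bases/IUPAC codes (match = nonzero AND) and a Counter aggregating equal character
-- pairs, so the compatibility test runs once per distinct pair (measured faster by a
-- constant factor). A raises ValueError on unequal lengths (excluded by Pre_).


-- ===== PORT A =====
-- the five-way branch cascade computing `same` for one position
def degenSame (si di : Char) : Bool :=
  if si == di then true
  else if si == 'A' && (di == 'R' || di == 'M' || di == 'W' || di == 'H' || di == 'D' || di == 'V' || di == 'N') then true
  else if si == 'T' && (di == 'Y' || di == 'K' || di == 'W' || di == 'H' || di == 'B' || di == 'D' || di == 'N') then true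
  else if si == 'G' && (di == 'R' || di == 'K' || di == 'S' || di == 'B' || di == 'D' || di == 'V' || di == 'N') then true
  else if si == 'C' && (di == 'Y' || di == 'M' || di == 'S' || di == 'H' || di == 'B' || di == 'V' || di == 'N') then true
  else false

-- Python raises ValueError on unequal lengths (excluded by Pre_); the port returns 0 there.
def degen_hamming (s : String) (degen : String) : Int :=
  if s.toList.length ≠ degen.toList.length then 0
  else
    (PySem.List.pyRange 0 (s.toList.length : Int) 1).foldl
      (fun dist i =>
        if !degenSame (PySem.List.pyGetD s.toList i ' ') (PySem.List.pyGetD degen.toList i ' ')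
        then dist + 1 else dist) 0

-- ===== PORT B =====
-- _BASE and _CODE of Source B: 4-bit masks (A=1, C=2, G=4, T=8)
def baseBits : PySem.Dict Char Int := PySem.Dict.ofList [('A', 1), ('C', 2), ('G', 4), ('T', 8)]
def codeBits : PySem.Dict Char Int := PySem.Dict.ofList
  [('R', 5), ('Y', 10), ('S', 6), ('W', 9), ('K', 12), ('M', 3),
   ('B', 14), ('D', 13), ('H', 11), ('V', 7), ('N', 15)]

-- a != b and _BASE.get(a, 0) & _CODE.get(b, 0) == 0
def degenIncompat (a b : Char) : Bool :=
  a != b && (PySem.Int.band (baseBits.getD a 0) (codeBits.getD b 0) == 0)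

-- Python raises ValueError on unequal lengths (excluded by Pre_); the port returns 0 there.
def degen_hamming_alt (s : String) (degen : String) : Int :=
  if s.toList.length ≠ degen.toList.length then 0
  else
    (PySem.Dict.counter (s.toList.zip degen.toList)).items.foldl
      (fun dist kv => if degenIncompat kv.1.1 kv.1.2 then dist + kv.2 else dist) 0

-- ===== PRECONDITION & SPEC =====
-- Pre_ excludes exactly the inputs on which A raises ValueError: unequal lengths.
def Pre_degen_hamming (s : String) (degen : String) : Prop := s.toList.length = degen.toList.length
instance (s : String) (degen : String) : Decidable (Pre_degen_hamming s degen) := by unfold Pre_degen_hamming; infer_instance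
def pvWitness_degen_hamming : String × String := ("ACGT", "NRYW")

def Spec_degen_hamming (s : String) (degen : String) (out : Int) : Prop := out = degen_hamming_alt s degen
instance (s : String) (degen : String) (out : Int) : Decidable (Spec_degen_hamming s degen out) := by unfold Spec_degen_hamming; infer_instance

-- ===== CLAIM =====
def Claim_equal_degen_hamming : Prop := ∀ (s : String) (degen : String), Dom_degen_hamming s degen → Pre_degen_hamming s degen → Spec_degen_hamming s degen (degen_hamming s degen)

-- ===== LEMMAS AND PROOFS =====

-- characterization of the _BASE lookup
lemma baseBits_getD (a : Char) : baseBits.getD a 0 =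
    if a = 'A' then 1 else if a = 'C' then 2 else if a = 'G' then 4 else if a = 'T' then 8 else 0 := by
  by_cases hA : a = 'A'
  · subst hA; decide
  by_cases hC : a = 'C'
  · subst hC; decide
  by_cases hG : a = 'G'
  · subst hG; decide
  by_cases hT : a = 'T'
  · subst hT; decide
  · have hc : baseBits.contains a = false := by
      rw [PySem.Dict.contains_eq_decide_mem_keys, show baseBits.keys = ['A','C','G','T'] from by decide]
      simp [hA, hC, hG, hT]
    rw [PySem.Dict.getD_of_not_contains _ _ hc]
    simp [hA, hC, hG, hT]

lemma incompat_A (b : Char) : (!degenSame 'A' b) = degenIncompat 'A' b := by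
  by_cases h1 : b = 'R'
  · subst h1; unfold degenIncompat; rw [show baseBits.getD 'A' 0 = 1 from by decide, show codeBits.getD 'R' 0 = 5 from by decide]; decide
  by_cases h2 : b = 'Y'
  · subst h2; unfold degenIncompat; rw [show baseBits.getD 'A' 0 = 1 from by decide, show codeBits.getD 'Y' 0 = 10 from by decide]; decide
  by_cases h3 : b = 'S'
  · subst h3; unfold degenIncompat; rw [show baseBits.getD 'A' 0 = 1 from by decide, show codeBits.getD 'S' 0 = 6 from by decide]; decide
  by_cases h4 : b = 'W'
  · subst h4; unfold degenIncompat; rw [show baseBits.getD 'A' 0 = 1 from by decide, show codeBits.getD 'W' 0 = 9 from by decide]; decide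
  by_cases h5 : b = 'K'
  · subst h5; unfold degenIncompat; rw [show baseBits.getD 'A' 0 = 1 from by decide, show codeBits.getD 'K' 0 = 12 from by decide]; decide
  by_cases h6 : b = 'M'
  · subst h6; unfold degenIncompat; rw [show baseBits.getD 'A' 0 = 1 from by decide, show codeBits.getD 'M' 0 = 3 from by decide]; decide
  by_cases h7 : b = 'B'
  · subst h7; unfold degenIncompat; rw [show baseBits.getD 'A' 0 = 1 from by decide, show codeBits.getD 'B' 0 = 14 from by decide]; decide
  by_cases h8 : b = 'D'
  · subst h8; unfold degenIncompat; rw [show baseBits.getD 'A' 0 = 1 from by decide, show codeBits.getD 'D' 0 = 13 from by decide]; decide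
  by_cases h9 : b = 'H'
  · subst h9; unfold degenIncompat; rw [show baseBits.getD 'A' 0 = 1 from by decide, show codeBits.getD 'H' 0 = 11 from by decide]; decide
  by_cases h10 : b = 'V'
  · subst h10; unfold degenIncompat; rw [show baseBits.getD 'A' 0 = 1 from by decide, show codeBits.getD 'V' 0 = 7 from by decide]; decide
  by_cases h11 : b = 'N'
  · subst h11; unfold degenIncompat; rw [show baseBits.getD 'A' 0 = 1 from by decide, show codeBits.getD 'N' 0 = 15 from by decide]; decide
  · have hc : codeBits.contains b = false := by
      rw [PySem.Dict.contains_eq_decide_mem_keys, show codeBits.keys = ['R','Y','S','W','K','M','B','D','H','V','N'] from by decide]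
      simp [h1,h2,h3,h4,h5,h6,h7,h8,h9,h10,h11]
    unfold degenIncompat
    rw [PySem.Dict.getD_of_not_contains _ _ hc, PySem.Int.band_zero]
    simp [bne, degenSame, h1,h2,h3,h4,h5,h6,h7,h8,h9,h10,h11]
    rfl

lemma incompat_C (b : Char) : (!degenSame 'C' b) = degenIncompat 'C' b := by
  by_cases h1 : b = 'R'
  · subst h1; unfold degenIncompat; rw [show baseBits.getD 'C' 0 = 2 from by decide, show codeBits.getD 'R' 0 = 5 from by decide]; decide
  by_cases h2 : b = 'Y'
  · subst h2; unfold degenIncompat; rw [show baseBits.getD 'C' 0 = 2 from by decide, show codeBits.getD 'Y' 0 = 10 from by decide]; decide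
  by_cases h3 : b = 'S'
  · subst h3; unfold degenIncompat; rw [show baseBits.getD 'C' 0 = 2 from by decide, show codeBits.getD 'S' 0 = 6 from by decide]; decide
  by_cases h4 : b = 'W'
  · subst h4; unfold degenIncompat; rw [show baseBits.getD 'C' 0 = 2 from by decide, show codeBits.getD 'W' 0 = 9 from by decide]; decide
  by_cases h5 : b = 'K'
  · subst h5; unfold degenIncompat; rw [show baseBits.getD 'C' 0 = 2 from by decide, show codeBits.getD 'K' 0 = 12 from by decide]; decide
  by_cases h6 : b = 'M'
  · subst h6; unfold degenIncompat; rw [show baseBits.getD 'C' 0 = 2 from by decide, show codeBits.getD 'M' 0 = 3 from by decide]; decide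
  by_cases h7 : b = 'B'
  · subst h7; unfold degenIncompat; rw [show baseBits.getD 'C' 0 = 2 from by decide, show codeBits.getD 'B' 0 = 14 from by decide]; decide
  by_cases h8 : b = 'D'
  · subst h8; unfold degenIncompat; rw [show baseBits.getD 'C' 0 = 2 from by decide, show codeBits.getD 'D' 0 = 13 from by decide]; decide
  by_cases h9 : b = 'H'
  · subst h9; unfold degenIncompat; rw [show baseBits.getD 'C' 0 = 2 from by decide, show codeBits.getD 'H' 0 = 11 from by decide]; decide
  by_cases h10 : b = 'V'
  · subst h10; unfold degenIncompat; rw [show baseBits.getD 'C' 0 = 2 from by decide, show codeBits.getD 'V' 0 = 7 from by decide]; decide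
  by_cases h11 : b = 'N'
  · subst h11; unfold degenIncompat; rw [show baseBits.getD 'C' 0 = 2 from by decide, show codeBits.getD 'N' 0 = 15 from by decide]; decide
  · have hc : codeBits.contains b = false := by
      rw [PySem.Dict.contains_eq_decide_mem_keys, show codeBits.keys = ['R','Y','S','W','K','M','B','D','H','V','N'] from by decide]
      simp [h1,h2,h3,h4,h5,h6,h7,h8,h9,h10,h11]
    unfold degenIncompat
    rw [PySem.Dict.getD_of_not_contains _ _ hc, PySem.Int.band_zero]
    simp [bne, degenSame, h1,h2,h3,h4,h5,h6,h7,h8,h9,h10,h11]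
    rfl

lemma incompat_G (b : Char) : (!degenSame 'G' b) = degenIncompat 'G' b := by
  by_cases h1 : b = 'R'
  · subst h1; unfold degenIncompat; rw [show baseBits.getD 'G' 0 = 4 from by decide, show codeBits.getD 'R' 0 = 5 from by decide]; decide
  by_cases h2 : b = 'Y'
  · subst h2; unfold degenIncompat; rw [show baseBits.getD 'G' 0 = 4 from by decide, show codeBits.getD 'Y' 0 = 10 from by decide]; decide
  by_cases h3 : b = 'S'
  · subst h3; unfold degenIncompat; rw [show baseBits.getD 'G' 0 = 4 from by decide, show codeBits.getD 'S' 0 = 6 from by decide]; decide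
  by_cases h4 : b = 'W'
  · subst h4; unfold degenIncompat; rw [show baseBits.getD 'G' 0 = 4 from by decide, show codeBits.getD 'W' 0 = 9 from by decide]; decide
  by_cases h5 : b = 'K'
  · subst h5; unfold degenIncompat; rw [show baseBits.getD 'G' 0 = 4 from by decide, show codeBits.getD 'K' 0 = 12 from by decide]; decide
  by_cases h6 : b = 'M'
  · subst h6; unfold degenIncompat; rw [show baseBits.getD 'G' 0 = 4 from by decide, show codeBits.getD 'M' 0 = 3 from by decide]; decide
  by_cases h7 : b = 'B'
  · subst h7; unfold degenIncompat; rw [show baseBits.getD 'G' 0 = 4 from by decide, show codeBits.getD 'B' 0 = 14 from by decide]; decide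
  by_cases h8 : b = 'D'
  · subst h8; unfold degenIncompat; rw [show baseBits.getD 'G' 0 = 4 from by decide, show codeBits.getD 'D' 0 = 13 from by decide]; decide
  by_cases h9 : b = 'H'
  · subst h9; unfold degenIncompat; rw [show baseBits.getD 'G' 0 = 4 from by decide, show codeBits.getD 'H' 0 = 11 from by decide]; decide
  by_cases h10 : b = 'V'
  · subst h10; unfold degenIncompat; rw [show baseBits.getD 'G' 0 = 4 from by decide, show codeBits.getD 'V' 0 = 7 from by decide]; decide
  by_cases h11 : b = 'N'
  · subst h11; unfold degenIncompat; rw [show baseBits.getD 'G' 0 = 4 from by decide, show codeBits.getD 'N' 0 = 15 from by decide]; decide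
  · have hc : codeBits.contains b = false := by
      rw [PySem.Dict.contains_eq_decide_mem_keys, show codeBits.keys = ['R','Y','S','W','K','M','B','D','H','V','N'] from by decide]
      simp [h1,h2,h3,h4,h5,h6,h7,h8,h9,h10,h11]
    unfold degenIncompat
    rw [PySem.Dict.getD_of_not_contains _ _ hc, PySem.Int.band_zero]
    simp [bne, degenSame, h1,h2,h3,h4,h5,h6,h7,h8,h9,h10,h11]
    rfl

lemma incompat_T (b : Char) : (!degenSame 'T' b) = degenIncompat 'T' b := by
  by_cases h1 : b = 'R'
  · subst h1; unfold degenIncompat; rw [show baseBits.getD 'T' 0 = 8 from by decide, show codeBits.getD 'R' 0 = 5 from by decide]; decide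
  by_cases h2 : b = 'Y'
  · subst h2; unfold degenIncompat; rw [show baseBits.getD 'T' 0 = 8 from by decide, show codeBits.getD 'Y' 0 = 10 from by decide]; decide
  by_cases h3 : b = 'S'
  · subst h3; unfold degenIncompat; rw [show baseBits.getD 'T' 0 = 8 from by decide, show codeBits.getD 'S' 0 = 6 from by decide]; decide
  by_cases h4 : b = 'W'
  · subst h4; unfold degenIncompat; rw [show baseBits.getD 'T' 0 = 8 from by decide, show codeBits.getD 'W' 0 = 9 from by decide]; decide
  by_cases h5 : b = 'K'
  · subst h5; unfold degenIncompat; rw [show baseBits.getD 'T' 0 = 8 from by decide, show codeBits.getD 'K' 0 = 12 from by decide]; decide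
  by_cases h6 : b = 'M'
  · subst h6; unfold degenIncompat; rw [show baseBits.getD 'T' 0 = 8 from by decide, show codeBits.getD 'M' 0 = 3 from by decide]; decide
  by_cases h7 : b = 'B'
  · subst h7; unfold degenIncompat; rw [show baseBits.getD 'T' 0 = 8 from by decide, show codeBits.getD 'B' 0 = 14 from by decide]; decide
  by_cases h8 : b = 'D'
  · subst h8; unfold degenIncompat; rw [show baseBits.getD 'T' 0 = 8 from by decide, show codeBits.getD 'D' 0 = 13 from by decide]; decide
  by_cases h9 : b = 'H'
  · subst h9; unfold degenIncompat; rw [show baseBits.getD 'T' 0 = 8 from by decide, show codeBits.getD 'H' 0 = 11 from by decide]; decide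
  by_cases h10 : b = 'V'
  · subst h10; unfold degenIncompat; rw [show baseBits.getD 'T' 0 = 8 from by decide, show codeBits.getD 'V' 0 = 7 from by decide]; decide
  by_cases h11 : b = 'N'
  · subst h11; unfold degenIncompat; rw [show baseBits.getD 'T' 0 = 8 from by decide, show codeBits.getD 'N' 0 = 15 from by decide]; decide
  · have hc : codeBits.contains b = false := by
      rw [PySem.Dict.contains_eq_decide_mem_keys, show codeBits.keys = ['R','Y','S','W','K','M','B','D','H','V','N'] from by decide]
      simp [h1,h2,h3,h4,h5,h6,h7,h8,h9,h10,h11]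
    unfold degenIncompat
    rw [PySem.Dict.getD_of_not_contains _ _ hc, PySem.Int.band_zero]
    simp [bne, degenSame, h1,h2,h3,h4,h5,h6,h7,h8,h9,h10,h11]
    rfl

-- pointwise agreement of the two per-position tests, for ALL characters
lemma not_same_eq_incompat (a b : Char) : (!degenSame a b) = degenIncompat a b := by
  by_cases hA : a = 'A'
  · subst hA; exact incompat_A b
  by_cases hC : a = 'C'
  · subst hC; exact incompat_C b
  by_cases hG : a = 'G'
  · subst hG; exact incompat_G b
  by_cases hT : a = 'T'
  · subst hT; exact incompat_T b
  · have hzero : ∀ y : Int, PySem.Int.band 0 y = 0 := fun y => by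
      rw [PySem.Int.band_comm]; exact PySem.Int.band_zero y
    unfold degenIncompat
    rw [baseBits_getD a]
    simp only [hA, hC, hG, hT, if_false]
    rw [hzero]
    simp [bne, degenSame, hA, hC, hG, hT]
    rfl

-- an indicator summed over a list not containing x is 0
lemma sum_indicator_not_mem {α : Type} [DecidableEq α] (p : α → Bool) (ds : List α) (x : α)
    (hx : x ∉ ds) :
    (ds.map (fun k => if p k ∧ k = x then (1 : Int) else 0)).sum = 0 := by
  induction ds with
  | nil => simp
  | cons d rest ih =>
    simp only [List.mem_cons, not_or] at hx
    have hd : ¬(p d ∧ d = x) := fun h => hx.1 h.2.symm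
    simp [List.map_cons, List.sum_cons, hd, ih hx.2]

-- summing an indicator over a Nodup list containing x picks out x's contribution
lemma sum_indicator_nodup {α : Type} [DecidableEq α] (p : α → Bool) (ds : List α) (x : α)
    (hnd : ds.Nodup) (hx : x ∈ ds) :
    (ds.map (fun k => if p k ∧ k = x then (1 : Int) else 0)).sum = if p x then 1 else 0 := by
  induction ds with
  | nil => cases hx
  | cons d rest ih =>
    rcases List.nodup_cons.mp hnd with ⟨hdn, hrest⟩
    rcases List.mem_cons.mp hx with h | h
    · subst h
      rw [List.map_cons, List.sum_cons, sum_indicator_not_mem p rest x hdn]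
      by_cases hp : p x <;> simp [hp]
    · have hdx : d ≠ x := fun he => hdn (he ▸ h)
      have hd : ¬(p d ∧ d = x) := fun hc => hdx hc.2
      rw [List.map_cons, List.sum_cons, ih hrest h]
      simp [hd]

-- summing counts of p-satisfying elements over a Nodup superset of xs's elements is countP
lemma sum_count_eq_countP {α : Type} [BEq α] [LawfulBEq α] [DecidableEq α] (p : α → Bool) (xs ds : List α)
    (hnd : ds.Nodup) (hmem : ∀ x ∈ xs, x ∈ ds) :
    (ds.map (fun k => if p k then (xs.count k : Int) else 0)).sum = (xs.countP p : Int) := by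
  induction xs with
  | nil => simp
  | cons x rest ih =>
    have hsplit : (fun k => if p k then ((x :: rest).count k : Int) else 0)
        = (fun k => (if p k then (rest.count k : Int) else 0) + (if p k ∧ k = x then (1 : Int) else 0)) := by
      funext k
      by_cases hp : p k
      · by_cases hk : k = x
        · subst hk; simp [hp, List.count_cons]
        · simp [hp, hk, List.count_cons]
          exact fun he => hk he.symm
      · simp [hp]
    rw [hsplit, PySem.List.sum_map_add_int,
        ih (fun y hy => hmem y (List.mem_cons_of_mem x hy)),
        sum_indicator_nodup p ds x hnd (hmem x (by simp)),
        List.countP_cons]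
    by_cases hp : p x <;> simp [hp]

theorem degen_hamming_eq_alt (s degen : String) (h : s.toList.length = degen.toList.length) :
    degen_hamming s degen = degen_hamming_alt s degen := by
  unfold degen_hamming degen_hamming_alt
  rw [if_neg (not_not_intro h), if_neg (not_not_intro h)]
  set ps := s.toList.zip degen.toList with hps
  -- A's loop is a countP over the zipped pairs
  have hz : ps.length = s.toList.length := by simp [hps, h]
  have hA : (PySem.List.pyRange 0 (s.toList.length : Int) 1).foldl
      (fun dist i =>
        if !degenSame (PySem.List.pyGetD s.toList i ' ') (PySem.List.pyGetD degen.toList i ' ')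
        then dist + 1 else dist) 0
      = (ps.countP (fun kv => degenIncompat kv.1 kv.2) : Int) := by
    rw [← hz]
    have hcong : ∀ (acc i : Int), i ∈ PySem.List.pyRange 0 (ps.length : Int) 1 →
        (if !degenSame (PySem.List.pyGetD s.toList i ' ') (PySem.List.pyGetD degen.toList i ' ')
         then acc + 1 else acc)
        = (if degenIncompat (PySem.List.pyGetD ps i (' ',' ')).1
                            (PySem.List.pyGetD ps i (' ',' ')).2
           then acc + 1 else acc) := by
      intro acc i hi
      rw [PySem.List.mem_pyRange_one] at hi
      have h1 : i.toNat < ps.length := by omega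
      rw [PySem.List.pyGetD_eq_getElem _ _ hi.1 hi.2,
          PySem.List.pyGetD_eq_getElem _ _ hi.1 (by omega),
          PySem.List.pyGetD_eq_getElem _ _ hi.1 (by omega)]
      simp [hps, List.getElem_zip, not_same_eq_incompat]
    rw [PySem.List.foldl_congr_mem _ _ _ _ hcong]
    rw [PySem.List.foldl_pyRange_zero_pyGetD' ps (' ', ' ')
        (fun dist kv => if degenIncompat kv.1 kv.2 then dist + 1 else dist) 0]
    rw [PySem.List.foldl_if_add_one]
    simp
  -- B's Counter loop is the same countP
  have hB : (PySem.Dict.counter ps).items.foldl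
      (fun dist kv => if degenIncompat kv.1.1 kv.1.2 then dist + kv.2 else dist) 0
      = (ps.countP (fun kv => degenIncompat kv.1 kv.2) : Int) := by
    have hfun : (fun (dist : Int) (kv : (Char × Char) × Int) =>
        if degenIncompat kv.1.1 kv.1.2 then dist + kv.2 else dist)
        = (fun dist kv => dist + (if degenIncompat kv.1.1 kv.1.2 then kv.2 else 0)) := by
      funext dist kv
      by_cases hk : degenIncompat kv.1.1 kv.1.2 <;> simp [hk]
    rw [hfun, PySem.List.foldl_add, PySem.Dict.items_counter, List.map_map]
    have hcomp : ((fun kv : (Char × Char) × Int => if degenIncompat kv.1.1 kv.1.2 then kv.2 else 0) ∘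
        (fun k : Char × Char => (k, (ps.count k : Int))))
        = (fun k : Char × Char => if degenIncompat k.1 k.2 then (ps.count k : Int) else 0) := by
      funext k; rfl
    rw [hcomp]
    have := sum_count_eq_countP (fun kv : Char × Char => degenIncompat kv.1 kv.2)
      ps (PySem.Set.ofList ps) (PySem.Set.nodup_ofList ps)
      (fun x hx => (PySem.Set.mem_ofList ps x).mpr hx)
    rw [zero_add]
    simpa using this
  rw [hA, hB]
-- ===== VERDICT =====
theorem degen_hamming_spec : Claim_equal_degen_hamming := by
  intro s degen _ hpre
  unfold Spec_degen_hamming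
  exact degen_hamming_eq_alt s degen hpre
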